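-- pv_equiv track=rewrite | github.com/Felia-Rhafida/peramalannFTS-cheng | Peramlan MPW.py | FLR
-- ===== SOURCE A (Python) =====
-- def FLR(fuzzifikasi):
--     flr = []
--     for i in range(len(fuzzifikasi)):
--         if i < 1:
--             flr.append(f">> {fuzzifikasi[i]}")
--         else:
--             flr.append(f"{fuzzifikasi[i-1]} >> {fuzzifikasi[i]}")
--     return flr
-- ===== SOURCE B (Python) =====
-- def FLR(fuzzifikasi):
--     out = []
--     rest = list(fuzzifikasi)
--     while len(rest) > 1:
--         cur = rest.pop()
--         out.append(f"{rest[-1]} >> {cur}")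
--     if rest:
--         out.append(f">> {rest[0]}")
--     out.reverse()
--     return out
-- ===== Notes on version B (the rewrite author's own statement) =====
-- stated objective: alternative
-- what changed: Consumes the list from the right, popping the last element each step and emitting the relations in reverse order, then reverses the accumulated output once at the end; no index arithmetic and no in-loop first-element branch.
import Mathlib
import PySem

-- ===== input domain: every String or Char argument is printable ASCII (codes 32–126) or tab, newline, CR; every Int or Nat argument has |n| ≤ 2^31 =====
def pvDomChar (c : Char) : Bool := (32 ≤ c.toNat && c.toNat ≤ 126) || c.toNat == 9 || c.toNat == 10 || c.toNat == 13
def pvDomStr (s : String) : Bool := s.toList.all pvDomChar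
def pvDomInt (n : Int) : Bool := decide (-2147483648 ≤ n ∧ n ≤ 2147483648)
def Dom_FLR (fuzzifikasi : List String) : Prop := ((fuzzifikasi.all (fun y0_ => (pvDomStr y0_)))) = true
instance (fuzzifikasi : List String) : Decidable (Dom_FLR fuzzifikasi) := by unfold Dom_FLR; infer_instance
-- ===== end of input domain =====

-- B consumes the list from the right (pop the last element each step), emitting the
-- relations in reverse order, and reverses the accumulated output once at the end;
-- objective: alternative decomposition, same cost.

-- ===== PORT A =====
def FLR (fuzzifikasi : List String) : List String :=
  (PySem.List.pyRange 0 fuzzifikasi.length 1).foldl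
    (fun flr i =>
      if i < 1 then
        flr ++ [">> " ++ PySem.List.pyGetD fuzzifikasi i ""]
      else
        flr ++ [PySem.List.pyGetD fuzzifikasi (i - 1) "" ++ " >> " ++ PySem.List.pyGetD fuzzifikasi i ""]) []

-- ===== PORT B =====
-- while len(rest) > 1: cur = rest.pop(); out.append(f"{rest[-1]} >> {cur}")
-- rest.pop() is getLast!/dropLast and rest[-1] is getLast!; both are guarded by len(rest) > 1,
-- so the '!' defaults are never reached and the port is exact.
def flrLoop (rest out : List String) : List String :=
  if rest.length > 1 then
    let cur := rest.getLast!
    let rest' := rest.dropLast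
    flrLoop rest' (out ++ [rest'.getLast! ++ " >> " ++ cur])
  else if rest.length > 0 then out ++ [">> " ++ rest.headI]   -- if rest: out.append(f">> {rest[0]}")
  else out
termination_by rest.length
decreasing_by simp [List.length_dropLast]; omega

def FLR_alt (fuzzifikasi : List String) : List String :=
  (flrLoop fuzzifikasi []).reverse   -- out.reverse(); return out

-- ===== PRECONDITION & SPEC =====
def Spec_FLR (fuzzifikasi : List String) (out : List String) : Prop := out = FLR_alt fuzzifikasi
instance (fuzzifikasi : List String) (out : List String) : Decidable (Spec_FLR fuzzifikasi out) := by unfold Spec_FLR; infer_instance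

-- ===== CLAIM (what is proved, stated in full; the proofs are below) =====
def Claim_equal_FLR : Prop := ∀ (fuzzifikasi : List String), Dom_FLR fuzzifikasi → Spec_FLR fuzzifikasi (FLR fuzzifikasi)

-- ===== LEMMAS AND PROOFS =====

-- the per-index value A appends at step i
def flrEntry (xs : List String) (i : Int) : String :=
  if i < 1 then ">> " ++ PySem.List.pyGetD xs i ""
  else PySem.List.pyGetD xs (i - 1) "" ++ " >> " ++ PySem.List.pyGetD xs i ""

def flrMap (xs : List String) : List String :=
  (List.range xs.length).map (fun k : Nat => flrEntry xs (k : Int))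

theorem FLR_eq_map (xs : List String) : FLR xs = flrMap xs := by
  unfold FLR flrMap
  have h : (fun (flr : List String) (i : Int) =>
      if i < 1 then flr ++ [">> " ++ PySem.List.pyGetD xs i ""]
      else flr ++ [PySem.List.pyGetD xs (i - 1) "" ++ " >> " ++ PySem.List.pyGetD xs i ""]) =
      fun flr i => flr ++ [flrEntry xs i] := by
    funext flr i; unfold flrEntry; split <;> rfl
  rw [h, PySem.List.foldl_append_singleton_eq_map, PySem.List.pyRange_zero_nat, List.map_map]
  rfl

theorem getD_append_lt (ys : List String) (c : String) (k : Nat) (h : k < ys.length) :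
    (ys ++ [c]).getD k "" = ys.getD k "" := by
  simp [List.getD, List.getElem?_append_left h]

theorem flrEntry_append (ys : List String) (c : String) (k : Nat) (h : k < ys.length) :
    flrEntry (ys ++ [c]) (k : Int) = flrEntry ys (k : Int) := by
  unfold flrEntry
  by_cases h0 : (k : Int) < 1
  · rw [if_pos h0, if_pos h0, PySem.List.pyGetD_natCast, PySem.List.pyGetD_natCast,
      getD_append_lt ys c k h]
  · have hk1 : 1 ≤ k := by omega
    have e : ((k : Int) - 1) = ((k - 1 : Nat) : Int) := by push_cast [hk1]; ring
    rw [if_neg h0, if_neg h0, e, PySem.List.pyGetD_natCast, PySem.List.pyGetD_natCast,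
      PySem.List.pyGetD_natCast, PySem.List.pyGetD_natCast,
      getD_append_lt ys c k h, getD_append_lt ys c (k - 1) (by omega)]

theorem flrMap_concat (ys : List String) (c : String) (hne : ys ≠ []) :
    flrMap (ys ++ [c]) = flrMap ys ++ [ys.getLast! ++ " >> " ++ c] := by
  unfold flrMap
  have hlen : (ys ++ [c]).length = ys.length + 1 := by simp
  rw [hlen, List.range_succ, List.map_append]
  congr 1
  · apply List.map_congr_left
    intro k hk
    rw [List.mem_range] at hk
    exact flrEntry_append ys c k hk
  · have h1 : 1 ≤ ys.length := by
      cases ys with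
      | nil => exact absurd rfl hne
      | cons a t => simp
    have h0 : ¬ ((ys.length : Int) < 1) := by omega
    have e : ((ys.length : Int) - 1) = ((ys.length - 1 : Nat) : Int) := by push_cast [h1]; ring
    simp only [List.map_cons, List.map_nil]
    unfold flrEntry
    rw [if_neg h0, e, PySem.List.pyGetD_natCast, PySem.List.pyGetD_natCast,
      getD_append_lt ys c (ys.length - 1) (by omega)]
    have hc : (ys ++ [c]).getD ys.length "" = c := by
      simp [List.getD]
    have hl : ys.getD (ys.length - 1) "" = ys.getLast! := by
      rw [List.getLast!_eq_getLast?_getD, List.getLast?_eq_getElem?]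
      simp [List.getD]
    rw [hc, hl]

theorem flrMap_single (c : String) : flrMap [c] = [">> " ++ c] := by
  unfold flrMap flrEntry
  simp [List.range_succ, PySem.List.pyGetD]

theorem flrLoop_eq (n : ℕ) : ∀ (rest out : List String), rest.length = n →
    flrLoop rest out = out ++ (flrMap rest).reverse := by
  induction n using Nat.strong_induction_on with
  | _ n ih =>
    intro rest out hn
    rw [flrLoop]
    by_cases h1 : rest.length > 1
    · rw [if_pos h1]
      rcases List.eq_nil_or_concat rest with h | ⟨ys, c, rfl⟩
      · subst h; simp at h1
      · have hys : ys ≠ [] := by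
          intro h; subst h; simp at h1
        have hg : (ys ++ [c]).getLast! = c := by
          rw [List.getLast!_eq_getLast?_getD]; simp
        simp only [List.concat_eq_append, List.dropLast_concat, hg]
        rw [ih ys.length (by simp at hn; omega) ys _ rfl,
          flrMap_concat ys c hys]
        simp
    · rw [if_neg h1]
      by_cases h0 : rest.length > 0
      · rw [if_pos h0]
        have : ∃ c, rest = [c] := by
          cases rest with
          | nil => simp at h0
          | cons a t =>
            cases t with
            | nil => exact ⟨a, rfl⟩
            | cons b u => simp at h1
        obtain ⟨c, rfl⟩ := this
        rw [flrMap_single]; rfl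
      · rw [if_neg h0]
        have : rest = [] := by
          cases rest with
          | nil => rfl
          | cons a t => simp at h0
        subst this
        simp [flrMap]

-- ===== VERDICT (by name: the statement is the Claim_ definition above) =====
theorem FLR_spec : Claim_equal_FLR := by
  intro xs _
  unfold Spec_FLR FLR_alt
  rw [flrLoop_eq xs.length xs [] rfl, FLR_eq_map]
  simp
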